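-- pv_equiv track=rewrite | github.com/tyler8812/algoexpert | Array/apartmentHunting/sol3.py | get_max_distances_at_blocks
-- ===== SOURCE A (Python) =====
-- def get_max_distances_at_blocks(blocks, min_distances_from_blocks):
--
--     max_distances = [0 for _ in blocks]
--     for i in range(len(blocks)):
--         min_distance_at_blocks = list(
--             map(lambda distances: distances[i], min_distances_from_blocks)
--         )
--         max_distances[i] = max(min_distance_at_blocks)
--     return max_distances
-- ===== SOURCE B (Python) =====
-- def get_max_distances_at_blocks(blocks, min_distances_from_blocks):
--     if not blocks:
--         return []
--     first, *rest = min_distances_from_blocks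
--     running_max = first[:len(blocks)]
--     for distances in rest:
--         for i in range(len(blocks)):
--             if distances[i] > running_max[i]:
--                 running_max[i] = distances[i]
--     return running_max
-- ===== Notes on version B (the rewrite author's own statement) =====
-- stated objective: alternative
-- what changed: B streams the matrix row-major in one pass, seeding per-column running maxima from the first row and updating them in place, instead of A's column-major scan that materialises each column as a list and calls max on it.
import Mathlib
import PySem

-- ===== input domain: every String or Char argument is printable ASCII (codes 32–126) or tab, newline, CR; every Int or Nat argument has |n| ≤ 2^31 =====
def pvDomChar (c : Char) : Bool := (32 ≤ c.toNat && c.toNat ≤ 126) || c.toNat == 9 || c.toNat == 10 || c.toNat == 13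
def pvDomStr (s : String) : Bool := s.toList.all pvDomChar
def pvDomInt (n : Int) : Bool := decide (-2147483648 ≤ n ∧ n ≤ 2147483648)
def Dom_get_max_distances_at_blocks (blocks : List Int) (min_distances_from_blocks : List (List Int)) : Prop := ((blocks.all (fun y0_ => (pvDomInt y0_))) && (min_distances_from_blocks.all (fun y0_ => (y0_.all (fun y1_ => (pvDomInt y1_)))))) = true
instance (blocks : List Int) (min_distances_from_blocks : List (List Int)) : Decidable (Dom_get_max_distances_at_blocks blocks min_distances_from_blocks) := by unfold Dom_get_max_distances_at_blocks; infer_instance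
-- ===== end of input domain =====

-- B replaces A's column-major scan (materialise each column, take max) by a single
-- row-major pass keeping per-column running maxima seeded from the first row (alternative decomposition).

-- ===== PORT A =====
def get_max_distances_at_blocks (blocks : List Int) (min_distances_from_blocks : List (List Int)) : List Int :=
  -- max_distances = [0 for _ in blocks]
  -- for i in range(len(blocks)):
  --     min_distance_at_blocks = list(map(lambda distances: distances[i], min_distances_from_blocks))
  --     max_distances[i] = max(min_distance_at_blocks)
  (PySem.List.pyRange 0 (blocks.length : Int)).foldl
    (fun max_distances i =>
      let min_distance_at_blocks :=
        min_distances_from_blocks.map (fun distances => PySem.List.pyGetD distances i 0)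
      PySem.List.pySetD max_distances i
        ((PySem.List.max? min_distance_at_blocks (fun y => y)).getD 0))
    (blocks.map (fun _ => 0))

-- ===== PORT B =====
-- the inner 'for i in range(len(blocks)): if distances[i] > running_max[i]: running_max[i] = distances[i]'
def pvUpdateRow (n : Nat) (running_max distances : List Int) : List Int :=
  (PySem.List.pyRange 0 (n : Int)).foldl
    (fun running_max i =>
      if PySem.List.pyGetD distances i 0 > PySem.List.pyGetD running_max i 0 then
        PySem.List.pySetD running_max i (PySem.List.pyGetD distances i 0)
      else running_max)
    running_max

def get_max_distances_at_blocks_alt (blocks : List Int) (min_distances_from_blocks : List (List Int)) : List Int :=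
  if blocks.isEmpty then []
  else
    match min_distances_from_blocks with
    | [] => []   -- Python B raises ValueError here (excluded by Pre_)
    | first :: rest =>
      rest.foldl (fun running_max distances => pvUpdateRow blocks.length running_max distances)
        (PySem.List.slice first none (some (blocks.length : Int)))

-- ===== PRECONDITION & SPEC =====
-- Pre_ excludes exactly the inputs where A raises: with nonempty blocks, an empty matrix
-- (max([]) is a ValueError) or a row shorter than blocks (distances[i] is an IndexError).
def Pre_get_max_distances_at_blocks (blocks : List Int) (min_distances_from_blocks : List (List Int)) : Prop :=
  blocks = [] ∨ (min_distances_from_blocks ≠ [] ∧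
    ∀ row ∈ min_distances_from_blocks, blocks.length ≤ row.length)
instance (blocks : List Int) (min_distances_from_blocks : List (List Int)) : Decidable (Pre_get_max_distances_at_blocks blocks min_distances_from_blocks) := by unfold Pre_get_max_distances_at_blocks; infer_instance

def pvWitness_get_max_distances_at_blocks : List Int × List (List Int) := ([3, 7], [[1, 4], [2, 0]])

def Spec_get_max_distances_at_blocks (blocks : List Int) (min_distances_from_blocks : List (List Int)) (out : List Int) : Prop := out = get_max_distances_at_blocks_alt blocks min_distances_from_blocks
instance (blocks : List Int) (min_distances_from_blocks : List (List Int)) (out : List Int) : Decidable (Spec_get_max_distances_at_blocks blocks min_distances_from_blocks out) := by unfold Spec_get_max_distances_at_blocks; infer_instance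

-- ===== CLAIM (what is proved, stated in full; the proofs are below) =====
def Claim_equal_get_max_distances_at_blocks : Prop := ∀ (blocks : List Int) (min_distances_from_blocks : List (List Int)), Dom_get_max_distances_at_blocks blocks min_distances_from_blocks → Pre_get_max_distances_at_blocks blocks min_distances_from_blocks → Spec_get_max_distances_at_blocks blocks min_distances_from_blocks (get_max_distances_at_blocks blocks min_distances_from_blocks)

-- ===== LEMMAS AND PROOFS =====

-- A's loop: each iteration writes slot i with a value independent of the accumulator.
lemma pv_drop_set (l : List Int) (k : Nat) (x : Int) (h : k < l.length) :
    (l.drop k).set 0 x = x :: l.drop (k + 1) := by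
  rw [List.drop_eq_getElem_cons h]
  rfl

lemma pv_setfold (v : Nat → Int) (init : List Int) (k : Nat) (hk : k ≤ init.length) :
    (List.range k).foldl (fun acc i => acc.set i (v i)) init
      = (List.range k).map v ++ init.drop k := by
  induction k with
  | zero => simp
  | succ k ih =>
    rw [List.range_succ, List.foldl_append, ih (by omega)]
    simp only [List.foldl_cons, List.foldl_nil, List.map_append, List.map_cons, List.map_nil]
    have hlen : ((List.range k).map v).length = k := by simp
    rw [List.set_append_right _ _ (by omega), hlen, Nat.sub_self,
        pv_drop_set init k (v k) (by omega)]
    simp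

-- B's inner loop: pointwise max of the running vector with the current row.
lemma pv_innerfold (row run : List Int) (k : Nat) (hk : k ≤ run.length) :
    (List.range k).foldl
        (fun r i => if row.getD i 0 > r.getD i 0 then r.set i (row.getD i 0) else r) run
      = (List.range k).map (fun j => max (run.getD j 0) (row.getD j 0)) ++ run.drop k := by
  induction k with
  | zero => simp
  | succ k ih =>
    rw [List.range_succ, List.foldl_append, ih (by omega)]
    simp only [List.foldl_cons, List.foldl_nil, List.map_append, List.map_cons, List.map_nil]
    have hlen : ((List.range k).map (fun j => max (run.getD j 0) (row.getD j 0))).length = k := by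
      simp
    have hkl : k < run.length := by omega
    have hget : ((List.range k).map (fun j => max (run.getD j 0) (row.getD j 0))
          ++ run.drop k).getD k 0 = run.getD k 0 := by
      have hl : k < ((List.range k).map (fun j => max (run.getD j 0) (row.getD j 0))
          ++ run.drop k).length := by simp; omega
      rw [List.getD_eq_getElem _ _ hl, List.getElem_append_right (by omega)]
      simp [List.getElem?_eq_getElem hkl]
    rw [hget]
    by_cases hc : row.getD k 0 > run.getD k 0
    · rw [if_pos hc, List.set_append_right _ _ (by omega), hlen, Nat.sub_self,
          pv_drop_set run k _ hkl, List.append_assoc]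
      congr 2
      exact (max_eq_right (le_of_lt hc)).symm
    · rw [if_neg hc, List.append_assoc]
      congr 1
      rw [List.drop_eq_getElem_cons hkl]
      congr 1
      rw [max_eq_left (not_lt.mp hc), List.getD_eq_getElem _ _ hkl]

lemma pvUpdateRow_eq (n : Nat) (run row : List Int) (hk : run.length = n) :
    pvUpdateRow n run row = (List.range n).map (fun j => max (run.getD j 0) (row.getD j 0)) := by
  unfold pvUpdateRow
  rw [PySem.List.pyRange_zero_natCast, List.foldl_map]
  simp only [PySem.List.pyGetD_natCast, PySem.List.pySetD_natCast]
  rw [pv_innerfold row run n (by omega)]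
  simp [hk]

-- B's outer loop: entry j of the running vector becomes a running max over the rows.
lemma pv_outerfold (n : Nat) (rest : List (List Int)) (run : List Int) (hlen : run.length = n) :
    rest.foldl (fun r row => pvUpdateRow n r row) run
      = (List.range n).map (fun j => (rest.map (fun r => r.getD j 0)).foldl max (run.getD j 0)) := by
  induction rest generalizing run with
  | nil =>
    simp only [List.foldl_nil, List.map_nil]
    apply List.ext_getElem (by simp [hlen])
    intro i h1 h2
    simp at h2
    simp [List.getElem?_eq_getElem h1]
  | cons row rest ih =>
    rw [List.foldl_cons, pvUpdateRow_eq n run row hlen,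
        ih _ (by simp)]
    apply List.map_congr_left
    intro j hj
    rw [List.mem_range] at hj
    rw [PySem.List.getD_map_range _ _ _ _ hj]
    simp [List.foldl_cons]

lemma pv_take_getD (l : List Int) (n j : Nat) (hj : j < n) (hn : n ≤ l.length) :
    (l.take n).getD j 0 = l.getD j 0 := by
  have h1 : j < (l.take n).length := by simp; omega
  have h2 : j < l.length := by omega
  rw [List.getD_eq_getElem _ _ h1, List.getD_eq_getElem _ _ h2]
  simp

-- ===== VERDICT (by name: the statement is the Claim_ definition above) =====
theorem get_max_distances_at_blocks_spec : Claim_equal_get_max_distances_at_blocks := by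
  intro blocks m _ hpre
  unfold Spec_get_max_distances_at_blocks
  unfold get_max_distances_at_blocks get_max_distances_at_blocks_alt
  by_cases hb : blocks = []
  · simp [hb, PySem.List.pyRange]
  · have hne : blocks.isEmpty = false := by simp [hb]
    rcases hpre with h | ⟨hm, hrows⟩
    · exact absurd h hb
    obtain ⟨first, rest, rfl⟩ : ∃ f r, m = f :: r := by
      cases m with
      | nil => exact absurd rfl hm
      | cons a b => exact ⟨a, b, rfl⟩
    have hfirst : blocks.length ≤ first.length := hrows first (by simp)
    simp only [hne, Bool.false_eq_true, if_false]
    -- A side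
    rw [PySem.List.pyRange_zero_natCast, List.foldl_map]
    simp only [PySem.List.pyGetD_natCast, PySem.List.pySetD_natCast]
    rw [pv_setfold _ _ blocks.length (by simp)]
    -- B side
    rw [PySem.List.slice_to_natCast,
        pv_outerfold blocks.length rest (first.take blocks.length) (by simp; omega)]
    have hdrop : (blocks.map (fun _ => (0 : Int))).drop blocks.length = [] := by simp
    rw [hdrop, List.append_nil]
    apply List.map_congr_left
    intro j hj
    rw [List.mem_range] at hj
    simp only [List.map_cons]
    rw [PySem.List.max?_id_cons]
    rw [pv_take_getD first blocks.length j hj hfirst]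
    simp
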